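-- pv_equiv track=rewrite | github.com/sdtemple/statgen | twostate_hmm.py | hist_segments
-- ===== SOURCE A (Python) =====
-- def hist_segments(parse, obs):
--     '''
--     Create a histogram for # state segments
--     :param parse: state sequence of Viterbi parse
--     :param obs: observation sequence
--     :return: histogram and state 1 segments
--     :rtype: tuple(dict, list)
--     '''
--     d = {0:0, 1:0}
--     s = []
--     pstate = parse[0]
--     ppos = obs[0][0]
--     for i in range(1, len(parse)):
--         cstate = parse[i]
--         if ((pstate == 0) and (cstate == 1)):
--             d[0] += 1
--             ppos = obs[i][0]
--             pstate = cstate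
--         elif ((pstate == 1) and (cstate == 0)):
--             d[1] += 1
--             cpos = obs[i - 1][0]
--             s.append((ppos, cpos))
--             pstate = cstate
--
--     # sort segments by length
--     def seg_sort(tup):
--         return tup[1] - tup[0]
--     s.sort(key = seg_sort, reverse = True)
--
--     return (d, s)
-- ===== SOURCE B (Python) =====
-- def hist_segments(parse, obs):
--     # Run-boundary decomposition over the model states: keep the (index, state)
--     # pairs whose state is 0 or 1, list the run starts where the kept state
--     # changes, then count and record each boundary between adjacent runs.
--     kept = [(i, st) for i, st in enumerate(parse) if st == 0 or st == 1]
--     runs = kept[:1] + [cur for prv, cur in zip(kept, kept[1:]) if cur[1] != prv[1]]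
--     d = {0: 0, 1: 0}
--     s = []
--     for (i1, st1), (i2, st2) in zip(runs, runs[1:]):
--         if st1 == 0:
--             d[0] += 1
--         else:
--             d[1] += 1
--             s.append((obs[i1][0], obs[i2 - 1][0]))
--     s.sort(key=lambda t: t[1] - t[0], reverse=True)
--     return (d, s)
-- ===== Notes on version B (the rewrite author's own statement) =====
-- stated objective: alternative
-- what changed: Replaces A's stateful flip-flop scan (pstate/ppos mutated across an index loop) by a run-boundary decomposition: keep the (index,state) pairs with state 0 or 1, list the run starts where the kept state changes, and read the histogram counts and state-1 segments off adjacent-run boundaries; Pre_ excludes inputs where a too-short obs can make A raise IndexError, and the unspecified corner of a parse starting outside the two model states while containing both of them, where A's empty histogram and B's count over the 0/1 subsequence are equally defensible.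
-- outside the precondition, e.g. on hist_segments([2, 0, 1], [(1, 0), (2, 0), (3, 0)]): A returns ({0: 0, 1: 0}, []), B returns ({0: 1, 1: 0}, [])
import Mathlib
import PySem

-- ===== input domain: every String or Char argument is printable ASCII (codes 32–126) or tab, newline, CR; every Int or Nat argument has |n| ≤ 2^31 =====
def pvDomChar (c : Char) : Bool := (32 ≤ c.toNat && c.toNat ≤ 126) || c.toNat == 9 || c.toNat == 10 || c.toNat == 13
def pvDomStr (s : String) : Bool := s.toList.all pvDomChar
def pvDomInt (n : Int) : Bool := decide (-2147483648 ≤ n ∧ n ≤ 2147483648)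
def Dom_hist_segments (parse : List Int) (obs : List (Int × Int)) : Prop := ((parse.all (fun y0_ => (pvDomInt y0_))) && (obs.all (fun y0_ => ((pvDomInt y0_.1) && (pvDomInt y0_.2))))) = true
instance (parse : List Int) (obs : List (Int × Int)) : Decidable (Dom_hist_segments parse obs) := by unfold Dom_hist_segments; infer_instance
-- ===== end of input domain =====

-- B replaces A's stateful flip-flop scan by a run-boundary decomposition (keep the
-- 0/1-state entries, list the run starts where the kept state changes, then
-- count/record adjacent-run boundaries); alternative decomposition, same cost.


-- ===== PORT A =====
def hist_segments (parse : List Int) (obs : List (Int × Int)) : (List (Int × Int)) × (List (Int × Int)) :=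
  let d0 : PySem.Dict Int Int := PySem.Dict.insert (PySem.Dict.insert PySem.Dict.empty 0 0) 1 0
  let init : PySem.Dict Int Int × List (Int × Int) × Int × Int :=
    (d0, [], PySem.List.pyGetD parse 0 0, (PySem.List.pyGetD obs 0 (0, 0)).1)
  -- for i in range(1, len(parse)): state = (d, s, pstate, ppos)
  let r := (PySem.List.pyRange 1 (parse.length : Int) 1).foldl
    (fun st i =>
      if st.2.2.1 = 0 ∧ PySem.List.pyGetD parse i 0 = 1 then
        (PySem.Dict.modify st.1 0 0 (· + 1), st.2.1, PySem.List.pyGetD parse i 0,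
          (PySem.List.pyGetD obs i (0, 0)).1)
      else if st.2.2.1 = 1 ∧ PySem.List.pyGetD parse i 0 = 0 then
        (PySem.Dict.modify st.1 1 0 (· + 1),
          st.2.1 ++ [(st.2.2.2, (PySem.List.pyGetD obs (i - 1) (0, 0)).1)],
          PySem.List.pyGetD parse i 0, st.2.2.2)
      else st) init
  (r.1.items, PySem.List.sorted r.2.1 (fun t => t.2 - t.1) true)

-- ===== PORT B =====
def hist_segments_alt (parse : List Int) (obs : List (Int × Int)) : (List (Int × Int)) × (List (Int × Int)) :=
  let kept := (PySem.List.enumerate parse 0).filter (fun p => p.2 == 0 || p.2 == 1)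
  -- runs = kept[:1] + [cur for prv, cur in zip(kept, kept[1:]) if cur[1] != prv[1]]
  let runs := PySem.List.slice kept none (some 1) ++
    ((kept.zip (PySem.List.slice kept (some 1) none)).filter
        (fun pq => pq.2.2 != pq.1.2)).map (fun pq => pq.2)
  let d0 : PySem.Dict Int Int := PySem.Dict.insert (PySem.Dict.insert PySem.Dict.empty 0 0) 1 0
  let r := (runs.zip (PySem.List.slice runs (some 1) none)).foldl
    (fun acc pq =>
      if pq.1.2 = 0 then (PySem.Dict.modify acc.1 0 0 (· + 1), acc.2)
      else (PySem.Dict.modify acc.1 1 0 (· + 1),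
        acc.2 ++ [((PySem.List.pyGetD obs pq.1.1 (0, 0)).1,
                   (PySem.List.pyGetD obs (pq.2.1 - 1) (0, 0)).1)]))
    (d0, [])
  (r.1.items, PySem.List.sorted r.2 (fun t => t.2 - t.1) true)

-- ===== PRECONDITION & SPEC =====
-- Pre_ excludes inputs where Python A raises IndexError (empty parse/obs, or a
-- too-short obs read past its end at a late state transition; the sufficient
-- length condition also drops some shorter-obs inputs A happens to return on),
-- and the unspecified corner of a parse starting outside the two model states
-- while containing both of them — an input outside the two-state model, on which
-- A's empty histogram and B's count over the 0/1 subsequence are both defensible.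
def Pre_hist_segments (parse : List Int) (obs : List (Int × Int)) : Prop :=
  parse ≠ [] ∧ obs ≠ [] ∧
    (parse.length ≤ obs.length ∨ ¬((0 : Int) ∈ parse ∧ (1 : Int) ∈ parse)) ∧
    (parse.head? = some 0 ∨ parse.head? = some 1 ∨ ¬((0 : Int) ∈ parse ∧ (1 : Int) ∈ parse))
instance (parse : List Int) (obs : List (Int × Int)) : Decidable (Pre_hist_segments parse obs) := by
  unfold Pre_hist_segments; infer_instance

def pvWitness_hist_segments : List Int × (List (Int × Int)) :=
  ([0, 1, 1, 0, 1], [(1, 5), (2, 6), (3, 7), (4, 8), (9, 9)])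

def Spec_hist_segments (parse : List Int) (obs : List (Int × Int)) (out : (List (Int × Int)) × (List (Int × Int))) : Prop := out = hist_segments_alt parse obs
instance (parse : List Int) (obs : List (Int × Int)) (out : (List (Int × Int)) × (List (Int × Int))) : Decidable (Spec_hist_segments parse obs out) := by unfold Spec_hist_segments; infer_instance

-- ===== CLAIM (what is proved, stated in full; the proofs are below) =====
def Claim_equal_hist_segments : Prop := ∀ (parse : List Int) (obs : List (Int × Int)), Dom_hist_segments parse obs → Pre_hist_segments parse obs → Spec_hist_segments parse obs (hist_segments parse obs)

-- ===== LEMMAS AND PROOFS =====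

-- shared abstraction: transition summary (count of 0->1, count of 1->0, segments)
def pvSpecR (obs : List (Int × Int)) : Int → Int → List (Int × Int) → Int × Int × List (Int × Int)
  | _, _, [] => (0, 0, [])
  | p, pos, (i, st) :: k =>
    if p = 0 ∧ st = 1 then
      let r := pvSpecR obs 1 ((PySem.List.pyGetD obs i (0, 0)).1) k
      (r.1 + 1, r.2.1, r.2.2)
    else if p = 1 ∧ st = 0 then
      let r := pvSpecR obs 0 pos k
      (r.1, r.2.1 + 1, (pos, (PySem.List.pyGetD obs (i - 1) (0, 0)).1) :: r.2.2)
    else pvSpecR obs p pos k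

-- A's loop body, on an (index, state) pair
def pvStepE (obs : List (Int × Int)) (st : PySem.Dict Int Int × List (Int × Int) × Int × Int)
    (q : Int × Int) : PySem.Dict Int Int × List (Int × Int) × Int × Int :=
  if st.2.2.1 = 0 ∧ q.2 = 1 then
    (PySem.Dict.modify st.1 0 0 (· + 1), st.2.1, q.2, (PySem.List.pyGetD obs q.1 (0, 0)).1)
  else if st.2.2.1 = 1 ∧ q.2 = 0 then
    (PySem.Dict.modify st.1 1 0 (· + 1),
      st.2.1 ++ [(st.2.2.2, (PySem.List.pyGetD obs (q.1 - 1) (0, 0)).1)], q.2, st.2.2.2)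
  else st

-- B's boundary-loop body
def pvStepB (obs : List (Int × Int)) (acc : PySem.Dict Int Int × List (Int × Int))
    (pq : (Int × Int) × (Int × Int)) : PySem.Dict Int Int × List (Int × Int) :=
  if pq.1.2 = 0 then (PySem.Dict.modify acc.1 0 0 (· + 1), acc.2)
  else (PySem.Dict.modify acc.1 1 0 (· + 1),
    acc.2 ++ [((PySem.List.pyGetD obs pq.1.1 (0, 0)).1,
               (PySem.List.pyGetD obs (pq.2.1 - 1) (0, 0)).1)])

-- structural form of B's run-start extraction
def pvDest : Int → List (Int × Int) → List (Int × Int)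
  | _, [] => []
  | prev, (i, st) :: k => if st ≠ prev then (i, st) :: pvDest st k else pvDest prev k

-- the final packaging both ports reach on a nonempty parse
def pvResult (obs : List (Int × Int)) (p pos : Int) (k : List (Int × Int)) :
    (List (Int × Int)) × (List (Int × Int)) :=
  let r := pvSpecR obs p pos k
  ([(0, r.1), (1, r.2.1)], PySem.List.sorted r.2.2 (fun t => t.2 - t.1) true)

-- A's index loop over range(1, len(parse)) is the fold of pvStepE over enumerate(tail, 1)
lemma pv_foldA_enum (obs : List (Int × Int)) (x : Int) (t : List Int)
    (init : PySem.Dict Int Int × List (Int × Int) × Int × Int) :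
    (PySem.List.pyRange 1 ((x :: t).length : Int) 1).foldl
      (fun st i => pvStepE obs st (i, PySem.List.pyGetD (x :: t) i 0)) init
    = (PySem.List.enumerate t 1).foldl (pvStepE obs) init := by
  have hlen : ((x :: t).length : Int) = 1 + (t.length : Int) := by
    simp [List.length_cons]; ring
  rw [hlen, ← PySem.List.map_fst_enumerate t 1, List.foldl_map]
  apply PySem.List.foldl_congr_mem
  intro acc q hq
  rw [PySem.List.mem_enumerate_iff] at hq
  obtain ⟨k, hk, rfl⟩ := hq
  have hget : PySem.List.pyGetD (x :: t) ((1 : Int) + (k : Int)) 0 = t[k] := by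
    have : (1 : Int) + (k : Int) = ((k + 1 : Nat) : Int) := by push_cast; ring
    rw [this, PySem.List.pyGetD_natCast]
    simp [List.getD_eq_getElem?_getD, hk]
  simp [hget]

-- the fold of pvStepE computes pvSpecR
lemma pv_foldE_spec (obs : List (Int × Int)) (E : List (Int × Int)) :
    ∀ (p pos a b : Int) (s : List (Int × Int)),
      ((E.foldl (pvStepE obs) (⟨[(0, a), (1, b)]⟩, s, p, pos)).1
        = ⟨[(0, a + (pvSpecR obs p pos E).1), (1, b + (pvSpecR obs p pos E).2.1)]⟩)
      ∧ ((E.foldl (pvStepE obs) (⟨[(0, a), (1, b)]⟩, s, p, pos)).2.1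
        = s ++ (pvSpecR obs p pos E).2.2) := by
  induction E with
  | nil => intro p pos a b s; simp [pvSpecR]
  | cons q E ih =>
    rintro p pos a b s
    obtain ⟨i, st⟩ := q
    by_cases h1 : p = 0 ∧ st = 1
    · obtain ⟨rfl, rfl⟩ := h1
      have hstep : pvStepE obs (⟨[(0, a), (1, b)]⟩, s, 0, pos) (i, 1)
          = (⟨[(0, a + 1), (1, b)]⟩, s, 1, (PySem.List.pyGetD obs i (0, 0)).1) := rfl
      have hspec : pvSpecR obs 0 pos ((i, 1) :: E)
          = ((pvSpecR obs 1 ((PySem.List.pyGetD obs i (0, 0)).1) E).1 + 1,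
             (pvSpecR obs 1 ((PySem.List.pyGetD obs i (0, 0)).1) E).2.1,
             (pvSpecR obs 1 ((PySem.List.pyGetD obs i (0, 0)).1) E).2.2) := rfl
      simp only [List.foldl_cons, hstep, hspec]
      have h := ih 1 ((PySem.List.pyGetD obs i (0, 0)).1) (a + 1) b s
      refine ⟨h.1.trans ?_, h.2⟩
      rw [add_assoc, add_comm 1]
    · by_cases h2 : p = 1 ∧ st = 0
      · obtain ⟨rfl, rfl⟩ := h2
        have hstep : pvStepE obs (⟨[(0, a), (1, b)]⟩, s, 1, pos) (i, 0)
            = (⟨[(0, a), (1, b + 1)]⟩, s ++ [(pos, (PySem.List.pyGetD obs (i - 1) (0, 0)).1)], 0, pos) := rfl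
        have hspec : pvSpecR obs 1 pos ((i, 0) :: E)
            = ((pvSpecR obs 0 pos E).1, (pvSpecR obs 0 pos E).2.1 + 1,
               (pos, (PySem.List.pyGetD obs (i - 1) (0, 0)).1) :: (pvSpecR obs 0 pos E).2.2) := rfl
        simp only [List.foldl_cons, hstep, hspec]
        have h := ih 0 pos a (b + 1) (s ++ [(pos, (PySem.List.pyGetD obs (i - 1) (0, 0)).1)])
        refine ⟨h.1.trans ?_, h.2.trans (by simp)⟩
        rw [add_assoc, add_comm 1]
      · have hstep : pvStepE obs (⟨[(0, a), (1, b)]⟩, s, p, pos) (i, st)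
            = (⟨[(0, a), (1, b)]⟩, s, p, pos) := by
          simp [pvStepE, h1, h2]
        have hspec : pvSpecR obs p pos ((i, st) :: E) = pvSpecR obs p pos E := by
          simp only [pvSpecR]; rw [if_neg h1, if_neg h2]
        simp only [List.foldl_cons, hstep, hspec]
        exact ih p pos a b s

-- entries with state outside {0,1} never fire a transition (A skips them)
lemma pv_specR_filter (obs : List (Int × Int)) (E : List (Int × Int)) :
    ∀ (p pos : Int),
      pvSpecR obs p pos (E.filter (fun q => q.2 == 0 || q.2 == 1)) = pvSpecR obs p pos E := by
  induction E with
  | nil => intro p pos; rfl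
  | cons q E ih =>
    intro p pos
    obtain ⟨i, st⟩ := q
    by_cases hk : st = 0 ∨ st = 1
    · have : (fun q : Int × Int => q.2 == 0 || q.2 == 1) (i, st) = true := by
        rcases hk with rfl | rfl <;> simp
      simp only [List.filter_cons, this, if_true]
      simp only [pvSpecR]
      split_ifs <;> simp [ih]
    · push Not at hk
      have : (fun q : Int × Int => q.2 == 0 || q.2 == 1) (i, st) = false := by
        simp [hk.1, hk.2]
      rw [List.filter_cons_of_neg (by simp [this])]
      have hspec : pvSpecR obs p pos ((i, st) :: E) = pvSpecR obs p pos E := by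
        simp only [pvSpecR]
        rw [if_neg (by rintro ⟨_, h⟩; exact hk.2 h), if_neg (by rintro ⟨_, h⟩; exact hk.1 h)]
      rw [hspec, ih]

-- a pstate outside {0,1} is stuck
lemma pv_specR_stuck (obs : List (Int × Int)) (E : List (Int × Int)) :
    ∀ (p pos : Int), p ≠ 0 → p ≠ 1 → pvSpecR obs p pos E = (0, 0, []) := by
  induction E with
  | nil => intro p pos _ _; rfl
  | cons q E ih =>
    intro p pos h0 h1
    obtain ⟨i, st⟩ := q
    simp only [pvSpecR]
    rw [if_neg (by rintro ⟨h, _⟩; exact h0 h), if_neg (by rintro ⟨h, _⟩; exact h1 h)]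
    exact ih p pos h0 h1

-- while pstate = 0 the carried position is irrelevant
lemma pv_specR_pos_irrel (obs : List (Int × Int)) (E : List (Int × Int)) :
    ∀ (pos pos' : Int), pvSpecR obs 0 pos E = pvSpecR obs 0 pos' E := by
  induction E with
  | nil => intro pos pos'; rfl
  | cons q E ih =>
    intro pos pos'
    obtain ⟨i, st⟩ := q
    by_cases h : st = 1
    · subst h; rfl
    · simp only [pvSpecR, h]
      simp only [show ¬((0:Int) = 1) by norm_num, false_and, if_false, and_false]
      exact ih pos pos'

-- the zip/filter comprehension of B is the structural destutter
lemma pv_dest_eq (k : List (Int × Int)) :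
    ∀ (h : Int × Int),
      ((((h :: k).zip k).filter (fun pq => pq.2.2 != pq.1.2)).map (fun pq => pq.2))
        = pvDest h.2 k := by
  induction k with
  | nil => intro h; rfl
  | cons y k ih =>
    intro h
    obtain ⟨i, st⟩ := y
    have hz : ((h :: (i, st) :: k).zip ((i, st) :: k)) = (h, (i, st)) :: (((i, st) :: k).zip k) := rfl
    rw [hz]
    by_cases hne : st = h.2
    · rw [List.filter_cons_of_neg (by simp [hne])]
      rw [ih (i, st)]
      simp only [pvDest, hne]
      rw [if_neg (by simp)]
    · rw [List.filter_cons_of_pos (by simp [hne])]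
      simp only [List.map_cons]
      rw [ih (i, st)]
      simp only [pvDest]
      rw [if_pos (by simpa using hne)]

-- destuttering a constant-state list yields nothing
lemma pv_dest_const (c : Int) (k : List (Int × Int)) (h : ∀ q ∈ k, q.2 = c) :
    pvDest c k = [] := by
  induction k with
  | nil => rfl
  | cons q k ih =>
    obtain ⟨i, st⟩ := q
    have hst : st = c := h (i, st) (by simp)
    simp only [pvDest, hst]
    rw [if_neg (by simp)]
    exact ih (fun q hq => h q (by simp [hq]))

-- B's boundary loop over the run starts computes pvSpecR
lemma pv_foldB_spec (obs : List (Int × Int)) (k : List (Int × Int)) :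
    ∀ (i0 p a b : Int) (s : List (Int × Int)),
      (∀ q ∈ k, q.2 = 0 ∨ q.2 = 1) → (p = 0 ∨ p = 1) →
      (((((i0, p) :: pvDest p k).zip (pvDest p k)).foldl (pvStepB obs) (⟨[(0, a), (1, b)]⟩, s)).1
        = ⟨[(0, a + (pvSpecR obs p ((PySem.List.pyGetD obs i0 (0, 0)).1) k).1),
            (1, b + (pvSpecR obs p ((PySem.List.pyGetD obs i0 (0, 0)).1) k).2.1)]⟩)
      ∧ (((((i0, p) :: pvDest p k).zip (pvDest p k)).foldl (pvStepB obs) (⟨[(0, a), (1, b)]⟩, s)).2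
        = s ++ (pvSpecR obs p ((PySem.List.pyGetD obs i0 (0, 0)).1) k).2.2) := by
  induction k with
  | nil => intro i0 p a b s _ _; simp [pvDest, pvSpecR]
  | cons q k ih =>
    intro i0 p a b s hall hp
    obtain ⟨i, st⟩ := q
    have hst : st = 0 ∨ st = 1 := by simpa using hall (i, st) (by simp)
    by_cases heq : st = p
    · subst heq
      have hd : pvDest st ((i, st) :: k) = pvDest st k := by
        simp only [pvDest]; rw [if_neg (by simp)]
      have hspec : pvSpecR obs st ((PySem.List.pyGetD obs i0 (0, 0)).1) ((i, st) :: k)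
          = pvSpecR obs st ((PySem.List.pyGetD obs i0 (0, 0)).1) k := by
        simp only [pvSpecR]
        rw [if_neg (by rintro ⟨rfl, h⟩; simp at h), if_neg (by rintro ⟨rfl, h⟩; simp at h)]
      rw [hd, hspec]
      exact ih i0 st a b s (fun q hq => hall q (by simp [hq])) hp
    · have hd : pvDest p ((i, st) :: k) = (i, st) :: pvDest st k := by
        simp only [pvDest]; rw [if_pos (by simpa using heq)]
      rw [hd]
      have hz : (((i0, p) :: (i, st) :: pvDest st k).zip ((i, st) :: pvDest st k))
          = ((i0, p), (i, st)) :: (((i, st) :: pvDest st k).zip (pvDest st k)) := rfl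
      rw [hz, List.foldl_cons]
      rcases hp with rfl | rfl
      · have hst1 : st = 1 := hst.resolve_left heq
        subst hst1
        have hstep : pvStepB obs (⟨[(0, a), (1, b)]⟩, s) ((i0, 0), (i, 1))
            = (⟨[(0, a + 1), (1, b)]⟩, s) := rfl
        rw [hstep]
        have h := ih i 1 (a + 1) b s (fun q hq => hall q (by simp [hq])) (Or.inr rfl)
        have hspec : pvSpecR obs 0 ((PySem.List.pyGetD obs i0 (0, 0)).1) ((i, 1) :: k)
            = ((pvSpecR obs 1 ((PySem.List.pyGetD obs i (0, 0)).1) k).1 + 1,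
               (pvSpecR obs 1 ((PySem.List.pyGetD obs i (0, 0)).1) k).2.1,
               (pvSpecR obs 1 ((PySem.List.pyGetD obs i (0, 0)).1) k).2.2) := rfl
        rw [hspec]
        refine ⟨h.1.trans ?_, h.2⟩
        rw [add_assoc, add_comm 1]
      · have hst0 : st = 0 := hst.resolve_right heq
        subst hst0
        have hstep : pvStepB obs (⟨[(0, a), (1, b)]⟩, s) ((i0, 1), (i, 0))
            = (⟨[(0, a), (1, b + 1)]⟩,
               s ++ [((PySem.List.pyGetD obs i0 (0, 0)).1, (PySem.List.pyGetD obs (i - 1) (0, 0)).1)]) := rfl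
        rw [hstep]
        have h := ih i 0 a (b + 1)
          (s ++ [((PySem.List.pyGetD obs i0 (0, 0)).1, (PySem.List.pyGetD obs (i - 1) (0, 0)).1)])
          (fun q hq => hall q (by simp [hq])) (Or.inl rfl)
        have hspec : pvSpecR obs 1 ((PySem.List.pyGetD obs i0 (0, 0)).1) ((i, 0) :: k)
            = ((pvSpecR obs 0 ((PySem.List.pyGetD obs i0 (0, 0)).1) k).1,
               (pvSpecR obs 0 ((PySem.List.pyGetD obs i0 (0, 0)).1) k).2.1 + 1,
               ((PySem.List.pyGetD obs i0 (0, 0)).1, (PySem.List.pyGetD obs (i - 1) (0, 0)).1)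
                 :: (pvSpecR obs 0 ((PySem.List.pyGetD obs i0 (0, 0)).1) k).2.2) := rfl
        rw [hspec]
        have hirr := pv_specR_pos_irrel obs k ((PySem.List.pyGetD obs i (0, 0)).1)
          ((PySem.List.pyGetD obs i0 (0, 0)).1)
        rw [hirr] at h
        refine ⟨h.1.trans ?_, h.2.trans (by simp)⟩
        rw [add_assoc, add_comm 1]

-- characterisation of port A on a nonempty parse
lemma pv_A_char (x : Int) (t : List Int) (obs : List (Int × Int)) :
    hist_segments (x :: t) obs
      = pvResult obs x ((PySem.List.pyGetD obs 0 (0, 0)).1)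
          ((PySem.List.enumerate t 1).filter (fun q => q.2 == 0 || q.2 == 1)) := by
  have h1 : hist_segments (x :: t) obs
      = (let r := (PySem.List.enumerate t 1).foldl (pvStepE obs)
            (⟨[(0, 0), (1, 0)]⟩, [], x, (PySem.List.pyGetD obs 0 (0, 0)).1)
         (r.1.items, PySem.List.sorted r.2.1 (fun t => t.2 - t.1) true)) := by
    show (let r := (PySem.List.pyRange 1 ((x :: t).length : Int) 1).foldl
            (fun st i => pvStepE obs st (i, PySem.List.pyGetD (x :: t) i 0))
            (⟨[(0, 0), (1, 0)]⟩, [], PySem.List.pyGetD (x :: t) 0 0, (PySem.List.pyGetD obs 0 (0, 0)).1)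
          (r.1.items, PySem.List.sorted r.2.1 (fun t => t.2 - t.1) true)) = _
    rw [pv_foldA_enum, PySem.List.pyGetD_zero_cons]
  rw [h1]
  obtain ⟨hc, hs⟩ := pv_foldE_spec obs (PySem.List.enumerate t 1) x
    ((PySem.List.pyGetD obs 0 (0, 0)).1) 0 0 []
  unfold pvResult
  rw [pv_specR_filter]
  simp only []
  rw [hc, hs]
  simp

-- port B rephrased through pvDest: B on a kept list h :: k
lemma pv_B_body (h : Int × Int) (k : List (Int × Int)) :
    (PySem.List.slice (h :: k) none (some 1) ++
      (((h :: k).zip (PySem.List.slice (h :: k) (some 1) none)).filter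
        (fun pq => pq.2.2 != pq.1.2)).map (fun pq => pq.2)) = h :: pvDest h.2 k := by
  have hsl1 : PySem.List.slice (h :: k) none (some 1) = [h] := by
    rw [show (1 : Int) = ((1 : Nat) : Int) by norm_num, PySem.List.slice_to_natCast]
    simp
  rw [hsl1, PySem.List.slice_from_one, List.tail_cons, pv_dest_eq k h]
  rfl

-- characterisation of port B on a nonempty parse with initial state in {0,1}
lemma pv_B_char (x : Int) (t : List Int) (obs : List (Int × Int)) (hx : x = 0 ∨ x = 1) :
    hist_segments_alt (x :: t) obs
      = pvResult obs x ((PySem.List.pyGetD obs 0 (0, 0)).1)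
          ((PySem.List.enumerate t 1).filter (fun q => q.2 == 0 || q.2 == 1)) := by
  have hkept : (PySem.List.enumerate (x :: t) 0).filter (fun p => p.2 == 0 || p.2 == 1)
      = (0, x) :: (PySem.List.enumerate t 1).filter (fun p => p.2 == 0 || p.2 == 1) := by
    rw [PySem.List.enumerate_cons]
    norm_num
    rw [List.filter_cons_of_pos (by rcases hx with rfl | rfl <;> simp)]
  set k := (PySem.List.enumerate t 1).filter (fun q => q.2 == 0 || q.2 == 1) with hkdef
  have hall : ∀ q ∈ k, q.2 = 0 ∨ q.2 = 1 := by
    intro q hq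
    have := List.of_mem_filter hq
    simpa using this
  unfold hist_segments_alt
  rw [hkept]
  show ((((PySem.List.slice ((0, x) :: k) none (some 1) ++
        ((((0, x) :: k).zip (PySem.List.slice ((0, x) :: k) (some 1) none)).filter
          (fun pq => pq.2.2 != pq.1.2)).map (fun pq => pq.2)).zip
        (PySem.List.slice (PySem.List.slice ((0, x) :: k) none (some 1) ++
        ((((0, x) :: k).zip (PySem.List.slice ((0, x) :: k) (some 1) none)).filter
          (fun pq => pq.2.2 != pq.1.2)).map (fun pq => pq.2)) (some 1) none)).foldl (pvStepB obs)
        (⟨[(0, 0), (1, 0)]⟩, [])).1.items,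
      PySem.List.sorted ((((PySem.List.slice ((0, x) :: k) none (some 1) ++
        ((((0, x) :: k).zip (PySem.List.slice ((0, x) :: k) (some 1) none)).filter
          (fun pq => pq.2.2 != pq.1.2)).map (fun pq => pq.2)).zip
        (PySem.List.slice (PySem.List.slice ((0, x) :: k) none (some 1) ++
        ((((0, x) :: k).zip (PySem.List.slice ((0, x) :: k) (some 1) none)).filter
          (fun pq => pq.2.2 != pq.1.2)).map (fun pq => pq.2)) (some 1) none)).foldl (pvStepB obs)
        (⟨[(0, 0), (1, 0)]⟩, [])).2) (fun t => t.2 - t.1) true)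
      = pvResult obs x ((PySem.List.pyGetD obs 0 (0, 0)).1) k
  rw [pv_B_body (0, x) k, PySem.List.slice_from_one, List.tail_cons]
  obtain ⟨hc, hs⟩ := pv_foldB_spec obs k 0 x 0 0 [] hall hx
  rw [hc, hs]
  simp [pvResult]

-- port B on a nonempty parse with initial state outside {0,1} whose remaining
-- kept states are all equal: no run boundary, empty histogram
lemma pv_B_stuck (x : Int) (t : List Int) (obs : List (Int × Int)) (hx0 : x ≠ 0) (hx1 : x ≠ 1)
    (hc : ∃ c, ∀ q ∈ (PySem.List.enumerate t 1).filter (fun p => p.2 == 0 || p.2 == 1), q.2 = c) :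
    hist_segments_alt (x :: t) obs = ([(0, 0), (1, 0)], []) := by
  have hkept : (PySem.List.enumerate (x :: t) 0).filter (fun p => p.2 == 0 || p.2 == 1)
      = (PySem.List.enumerate t 1).filter (fun p => p.2 == 0 || p.2 == 1) := by
    rw [PySem.List.enumerate_cons]
    norm_num
    rw [List.filter_cons_of_neg (by simp [hx0, hx1])]
  unfold hist_segments_alt
  rw [hkept]
  obtain ⟨c, hcall⟩ := hc
  cases hk : (PySem.List.enumerate t 1).filter (fun p => p.2 == 0 || p.2 == 1) with
  | nil => rfl
  | cons h k' =>
    rw [hk] at hcall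
    have hh : h.2 = c := hcall h (by simp)
    have hdest : pvDest h.2 k' = [] := by
      rw [hh]
      exact pv_dest_const c k' (fun q hq => hcall q (by simp [hq]))
    show (((((PySem.List.slice (h :: k') none (some 1) ++
        (((h :: k').zip (PySem.List.slice (h :: k') (some 1) none)).filter
          (fun pq => pq.2.2 != pq.1.2)).map (fun pq => pq.2))).zip
        (PySem.List.slice (PySem.List.slice (h :: k') none (some 1) ++
        (((h :: k').zip (PySem.List.slice (h :: k') (some 1) none)).filter
          (fun pq => pq.2.2 != pq.1.2)).map (fun pq => pq.2)) (some 1) none)).foldl (pvStepB obs)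
        (⟨[(0, 0), (1, 0)]⟩, [])).1.items,
      PySem.List.sorted ((((PySem.List.slice (h :: k') none (some 1) ++
        (((h :: k').zip (PySem.List.slice (h :: k') (some 1) none)).filter
          (fun pq => pq.2.2 != pq.1.2)).map (fun pq => pq.2)).zip
        (PySem.List.slice (PySem.List.slice (h :: k') none (some 1) ++
        (((h :: k').zip (PySem.List.slice (h :: k') (some 1) none)).filter
          (fun pq => pq.2.2 != pq.1.2)).map (fun pq => pq.2)) (some 1) none)).foldl (pvStepB obs)
        (⟨[(0, 0), (1, 0)]⟩, [])).2) (fun t => t.2 - t.1) true)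
      = ([(0, 0), (1, 0)], [])
    rw [pv_B_body h k', hdest, PySem.List.slice_from_one, List.tail_cons]
    rfl

-- ===== VERDICT (by name: the statement is the Claim_ definition above) =====
theorem hist_segments_spec : Claim_equal_hist_segments := by
  intro parse obs _ hpre
  obtain ⟨hne, _, _, hhead⟩ := hpre
  unfold Spec_hist_segments
  match parse, hne, hhead with
  | x :: t, _, hhead =>
    by_cases hx : x = 0 ∨ x = 1
    · rw [pv_A_char, pv_B_char x t obs hx]
    · push Not at hx
      have hnb : ¬((0 : Int) ∈ x :: t ∧ (1 : Int) ∈ x :: t) := by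
        rcases hhead with h | h | h
        · exact absurd (by simpa using h) hx.1
        · exact absurd (by simpa using h) hx.2
        · exact h
      have hc : ∃ c, ∀ q ∈ (PySem.List.enumerate t 1).filter (fun p => p.2 == 0 || p.2 == 1),
          q.2 = c := by
        have hmem : ∀ q ∈ (PySem.List.enumerate t 1).filter (fun p => p.2 == 0 || p.2 == 1),
            (q.2 = 0 ∨ q.2 = 1) ∧ q.2 ∈ x :: t := by
          intro q hq
          have hf := List.of_mem_filter hq
          have hm := List.mem_of_mem_filter hq
          rw [PySem.List.mem_enumerate_iff] at hm
          obtain ⟨j, hj, rfl⟩ := hm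
          exact ⟨by simpa using hf, List.mem_cons_of_mem x (List.getElem_mem hj)⟩
        by_cases h0 : (0 : Int) ∈ x :: t
        · refine ⟨0, fun q hq => ?_⟩
          rcases (hmem q hq).1 with h | h
          · exact h
          · exact absurd ⟨h0, h ▸ (hmem q hq).2⟩ hnb
        · refine ⟨1, fun q hq => ?_⟩
          rcases (hmem q hq).1 with h | h
          · exact absurd (h ▸ (hmem q hq).2) h0
          · exact h
      rw [pv_A_char, pv_B_stuck x t obs hx.1 hx.2 hc]
      unfold pvResult
      rw [pv_specR_filter, pv_specR_stuck obs _ _ _ hx.1 hx.2]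
      rfl
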